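-- pv_equiv track=rewrite | github.com/ARadRareness/pyfe | interface/file_conversion/epub/find_lib.py | find_between
-- ===== SOURCE A (Python) =====
-- from typing import List, Tuple
--
-- def find_between(
--     text: str, patterns: List[str], start_index: int = 0
-- ) -> Tuple[List[str], int]:
--     if len(patterns) < 2 or start_index == -1:
--         return [], -1
--
--     indices: List[int] = []
--     current_index = start_index
--     prev_pattern_length = 0
--
--     for pattern in patterns:
--         current_index = text.find(pattern, current_index + prev_pattern_length)
--         if current_index != -1:
--             indices.append(current_index)
--             prev_pattern_length = len(pattern)
--         else:
--             return [], -1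
--
--     found_segments = []
--     for i in range(len(indices) - 1):
--         start = indices[i] + len(patterns[i])
--         end = indices[i + 1]
--         found_segments.append(text[start:end])
--
--     return found_segments, indices[-1] + len(patterns[-1])
-- ===== SOURCE B (Python) =====
-- from typing import List, Tuple
--
-- def find_between(
--     text: str, patterns: List[str], start_index: int = 0
-- ) -> Tuple[List[str], int]:
--     # Single pass: the search cursor for each find IS the start of the next
--     # segment (previous match position + previous pattern length), so one
--     # variable `seg_start` drives both the find and the slice.
--     if len(patterns) < 2 or start_index == -1:
--         return [], -1
--     pos = text.find(patterns[0], start_index)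
--     if pos == -1:
--         return [], -1
--     seg_start = pos + len(patterns[0])
--     segments: List[str] = []
--     for pattern in patterns[1:]:
--         pos = text.find(pattern, seg_start)
--         if pos == -1:
--             return [], -1
--         segments.append(text[seg_start:pos])
--         seg_start = pos + len(pattern)
--     return segments, seg_start
-- ===== Notes on version B (the rewrite author's own statement) =====
-- stated objective: simpler
-- what changed: B replaces A's two phases (collect all match positions into a list, then a second index loop pairing positions to slice segments) with a single pass over patterns[1:] that keeps one seg_start cursor serving as both the find start and the slice start, emitting each segment as its end match is found; the indices list and the pairwise loop disappear.
import Mathlib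
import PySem

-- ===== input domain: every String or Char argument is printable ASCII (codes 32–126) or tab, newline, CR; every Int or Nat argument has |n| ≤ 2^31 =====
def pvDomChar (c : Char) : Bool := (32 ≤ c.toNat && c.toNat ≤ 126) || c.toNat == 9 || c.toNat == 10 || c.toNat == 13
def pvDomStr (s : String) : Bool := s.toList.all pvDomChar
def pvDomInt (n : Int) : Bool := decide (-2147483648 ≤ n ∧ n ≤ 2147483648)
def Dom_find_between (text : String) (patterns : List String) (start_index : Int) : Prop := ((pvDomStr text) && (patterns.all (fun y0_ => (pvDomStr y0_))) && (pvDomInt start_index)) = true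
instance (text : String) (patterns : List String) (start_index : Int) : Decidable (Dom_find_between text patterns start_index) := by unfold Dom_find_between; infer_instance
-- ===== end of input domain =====

-- B is a single pass keeping one `seg_start` cursor (no indices list, no second pairwise loop); same return value, same cost class.

-- ===== PORT A =====
-- phase 1 of A: collect the match positions, early-return (none) on a miss
def pvALoop (text : String) : List String → List Int → Int → Int → Option (List Int)
  | [], indices, _, _ => some indices
  | p :: ps, indices, cur, prev =>
    let c := PySem.Str.findFrom text p (cur + prev)
    if c ≠ -1 then pvALoop text ps (indices ++ [c]) c (PySem.Str.len p)
    else none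

def find_between (text : String) (patterns : List String) (start_index : Int) : List String × Int :=
  if PySem.List.len patterns < 2 ∨ start_index = -1 then ([], -1)
  else
    match pvALoop text patterns [] start_index 0 with
    | none => ([], -1)
    | some indices =>
      let found_segments := (PySem.List.pyRange 0 (PySem.List.len indices - 1)).foldl
        (fun acc i =>
          let start := PySem.List.pyGetD indices i 0 + PySem.Str.len (PySem.List.pyGetD patterns i "")
          let stop := PySem.List.pyGetD indices (i + 1) 0
          acc ++ [PySem.Str.slice text (some start) (some stop)]) []
      (found_segments, PySem.List.pyGetD indices (-1) 0 + PySem.Str.len (PySem.List.pyGetD patterns (-1) ""))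

-- ===== PORT B =====
-- B's single loop over patterns[1:]: `seg_start` is both the find cursor and the slice start
def pvBLoop (text : String) : List String → List String → Int → List String × Int
  | [], segments, seg_start => (segments, seg_start)
  | p :: ps, segments, seg_start =>
    let pos := PySem.Str.findFrom text p seg_start
    if pos = -1 then ([], -1)
    else pvBLoop text ps (segments ++ [PySem.Str.slice text (some seg_start) (some pos)]) (pos + PySem.Str.len p)

def find_between_alt (text : String) (patterns : List String) (start_index : Int) : List String × Int :=
  if PySem.List.len patterns < 2 ∨ start_index = -1 then ([], -1)
  else
    match patterns with
    | [] => ([], -1)  -- unreachable: the guard requires at least 2 patterns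
    | p0 :: rest =>
      let pos := PySem.Str.findFrom text p0 start_index
      if pos = -1 then ([], -1)
      else pvBLoop text rest [] (pos + PySem.Str.len p0)

-- ===== PRECONDITION & SPEC =====
def Spec_find_between (text : String) (patterns : List String) (start_index : Int) (out : List String × Int) : Prop := out = find_between_alt text patterns start_index
instance (text : String) (patterns : List String) (start_index : Int) (out : List String × Int) : Decidable (Spec_find_between text patterns start_index out) := by unfold Spec_find_between; infer_instance

-- ===== CLAIM (what is proved, stated in full; the proofs are below) =====
def Claim_equal_find_between : Prop := ∀ (text : String) (patterns : List String) (start_index : Int), Dom_find_between text patterns start_index → Spec_find_between text patterns start_index (find_between text patterns start_index)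

-- ===== LEMMAS AND PROOFS =====

-- ghost: A's phase 1 without the accumulator
def pvMatch (text : String) : List String → Int → Int → Option (List Int)
  | [], _, _ => some []
  | p :: ps, cur, prev =>
    let c := PySem.Str.findFrom text p (cur + prev)
    if c ≠ -1 then (pvMatch text ps c (PySem.Str.len p)).map (c :: ·) else none

-- ghost: the segments/end-offset built from a start offset and (pattern, position) pairs
def pvChain (text : String) : Int → List (String × Int) → List String × Int
  | s, [] => ([], s)
  | s, (p, c) :: rest =>
    let r := pvChain text (c + PySem.Str.len p) rest
    (PySem.Str.slice text (some s) (some c) :: r.1, r.2)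

theorem pvALoop_eq (text : String) : ∀ (ps : List String) (acc : List Int) (cur prev : Int),
    pvALoop text ps acc cur prev = (pvMatch text ps cur prev).map (acc ++ ·) := by
  intro ps
  induction ps with
  | nil => intro acc cur prev; simp [pvALoop, pvMatch]
  | cons p ps ih =>
    intro acc cur prev
    simp only [pvALoop, pvMatch]
    set c := PySem.Str.findFrom text p (cur + prev) with hc
    by_cases h : c = -1
    · simp [h]
    · cases hm : pvMatch text ps c (↑p.length : Int) <;> simp [h, hm, ih]

theorem pvMatch_length (text : String) : ∀ (ps : List String) (cur prev : Int) (J : List Int),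
    pvMatch text ps cur prev = some J → J.length = ps.length := by
  intro ps
  induction ps with
  | nil => intro cur prev J h; simp [pvMatch] at h; simp [← h]
  | cons p ps ih =>
    intro cur prev J h
    simp only [pvMatch] at h
    set c := PySem.Str.findFrom text p (cur + prev) with hc
    by_cases hne : c = -1
    · simp [hne] at h
    · simp only [hne, ne_eq, not_false_iff, if_true, Option.map_eq_some_iff] at h
      obtain ⟨J', hJ', rfl⟩ := h
      simp [ih _ _ _ hJ']

theorem pvMatch_shift (text : String) : ∀ (ps : List String) (cur prev : Int),
    pvMatch text ps cur prev = pvMatch text ps (cur + prev) 0 := by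
  intro ps cur prev
  cases ps with
  | nil => rfl
  | cons p ps => simp [pvMatch]

theorem pvBLoop_eq (text : String) : ∀ (ps : List String) (segs : List String) (s : Int),
    pvBLoop text ps segs s =
      match pvMatch text ps s 0 with
      | none => ([], -1)
      | some J => ((segs ++ (pvChain text s (ps.zip J)).1, (pvChain text s (ps.zip J)).2) : List String × Int) := by
  intro ps
  induction ps with
  | nil => intro segs s; simp [pvBLoop, pvMatch, pvChain]
  | cons p ps ih =>
    intro segs s
    simp only [pvBLoop, pvMatch, add_zero]
    set pos := PySem.Str.findFrom text p s with hpos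
    by_cases h : pos = -1
    · simp [h]
    · rw [pvMatch_shift]
      cases hm : pvMatch text ps (pos + (↑p.length : Int)) 0 with
      | none => simp [h, ih, hm]
      | some J => simp [h, ih, hm, pvChain]

theorem pvChain_fst (text : String) : ∀ (P' : List String) (J' : List Int) (p : String) (c : Int),
    J'.length = P'.length →
    (List.range P'.length).map (fun k =>
        PySem.Str.slice text (some ((c :: J').getD k 0 + PySem.Str.len ((p :: P').getD k "")))
          (some ((c :: J').getD (k + 1) 0)))
      = (pvChain text (c + PySem.Str.len p) (P'.zip J')).1 := by
  intro P'
  induction P' with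
  | nil =>
    intro J' p c h
    simp [pvChain]
  | cons q P'' ih =>
    intro J' p c h
    cases J' with
    | nil => simp at h
    | cons d J'' =>
      simp only [List.length_cons, List.zip_cons_cons, pvChain]
      rw [List.range_succ_eq_map, List.map_cons, List.map_map]
      congr 1
      exact ih J'' q d (by simpa using h)

theorem pvChain_snd (text : String) : ∀ (P' : List String) (J' : List Int) (p : String) (c : Int),
    J'.length = P'.length →
    (pvChain text (c + PySem.Str.len p) (P'.zip J')).2
      = (c :: J').getLast (by simp) + PySem.Str.len ((p :: P').getLast (by simp)) := by
  intro P'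
  induction P' with
  | nil => intro J' p c h; simp at h; subst h; simp [pvChain]
  | cons q P'' ih =>
    intro J' p c h
    cases J' with
    | nil => simp at h
    | cons d J'' =>
      simp only [List.zip_cons_cons, pvChain]
      rw [ih J'' q d (by simpa using h)]
      simp [List.getLast_cons]

-- ===== VERDICT (by name: the statement is the Claim_ definition above) =====
theorem find_between_spec : Claim_equal_find_between := by
  intro text patterns start_index _
  unfold Spec_find_between find_between find_between_alt
  by_cases hg : PySem.List.len patterns < 2 ∨ start_index = -1
  · rw [if_pos hg, if_pos hg]
  · rw [if_neg hg, if_neg hg]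
    cases patterns with
    | nil => exact absurd (Or.inl (by simp [PySem.List.len_eq])) hg
    | cons p0 rest =>
      rw [pvALoop_eq]
      simp only [pvMatch, add_zero]
      set pos := PySem.Str.findFrom text p0 start_index with hp
      by_cases h0 : pos = -1
      · simp [h0]
      · rw [pvMatch_shift, pvBLoop_eq]
        cases hm : pvMatch text rest (pos + PySem.Str.len p0) 0 with
        | none => simp [h0]
        | some J =>
          have hlen := pvMatch_length text rest _ _ _ hm
          have h1 := pvChain_fst text rest J p0 pos hlen
          have h2 := pvChain_snd text rest J p0 pos hlen
          simp only [h0, ne_eq, not_false_iff, if_true, Option.map_some, List.nil_append]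
          rw [if_neg (by simp), PySem.List.foldl_append_singleton_eq_map]
          have hl : PySem.List.len (pos :: J) - 1 = ((J.length : Int)) := by
            simp [PySem.List.len_eq]
          rw [hl, PySem.List.pyRange_zero_natCast, List.map_map, hlen]
          refine Prod.ext ?_ ?_
          · simp only [List.nil_append]
            rw [← h1]
            apply List.map_congr_left
            intro k _
            have hk1 : ((k : Int) + 1) = (((k + 1 : Nat) : Int)) := by push_cast; ring
            simp only [Function.comp_apply, hk1, PySem.List.pyGetD_natCast]
          · rw [PySem.List.pyGetD_neg_one _ _ (by simp), PySem.List.pyGetD_neg_one _ _ (by simp)]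
            exact h2.symm
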